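-- pv_equiv track=rewrite | github.com/mihalsabados/nine-men-s-morris-mice- | ASP-Projekat1/Main.py | threePieces
-- ===== SOURCE A (Python) =====
-- def threePieces(two_pieces_list):
--     no_duplicates_list = list(dict.fromkeys(two_pieces_list))
--     three_pieces = 0
--     for piece in no_duplicates_list:
--         count = two_pieces_list.count(piece)
--         if count == 2:
--             three_pieces += 1
--         if count == 3:
--             three_pieces += 2
--     return three_pieces
-- ===== SOURCE B (Python) =====
-- def threePieces(two_pieces_list):
--     # Sort a copy, then a single linear scan over runs of equal elements:
--     # run length 2 scores 1, run length 3 scores 2.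
--     score = 0
--     run = 0
--     prev = None
--     for x in sorted(two_pieces_list):
--         if run and x == prev:
--             run += 1
--         else:
--             if run == 2:
--                 score += 1
--             elif run == 3:
--                 score += 2
--             run = 1
--             prev = x
--     if run == 2:
--         score += 1
--     elif run == 3:
--         score += 2
--     return score
-- ===== Notes on version B (the rewrite author's own statement) =====
-- stated objective: faster
-- what changed: Sorts a copy of the list and scores runs of equal consecutive elements in one linear scan, instead of deduplicating and re-scanning the whole list with list.count for every distinct element.
import Mathlib
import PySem

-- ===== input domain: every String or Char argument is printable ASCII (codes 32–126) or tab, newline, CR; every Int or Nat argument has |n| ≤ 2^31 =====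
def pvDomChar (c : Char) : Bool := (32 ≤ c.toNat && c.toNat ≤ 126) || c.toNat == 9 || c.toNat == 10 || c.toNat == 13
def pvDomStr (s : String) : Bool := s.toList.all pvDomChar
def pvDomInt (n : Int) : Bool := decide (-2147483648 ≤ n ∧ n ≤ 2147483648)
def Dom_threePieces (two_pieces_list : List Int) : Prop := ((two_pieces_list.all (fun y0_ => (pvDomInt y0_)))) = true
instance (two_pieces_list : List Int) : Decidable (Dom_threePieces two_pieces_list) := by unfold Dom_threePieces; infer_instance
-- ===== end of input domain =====

-- B sorts a copy and scores runs of equal consecutive elements in one linear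
-- scan, replacing A's dedup + repeated list.count scans (faster: O(n log n) vs O(n^2)).

-- ===== PORT A =====
def threePieces (two_pieces_list : List Int) : Int :=
  let no_duplicates_list := PySem.List.dedup two_pieces_list
  no_duplicates_list.foldl (fun three_pieces piece =>
    let count := PySem.List.count two_pieces_list piece
    let three_pieces := if count = 2 then three_pieces + 1 else three_pieces
    if count = 3 then three_pieces + 2 else three_pieces) 0

-- ===== PORT B =====
-- the shared 'if run == 2: score += 1  elif run == 3: score += 2' flush of Source B
def pvFlush (score run : Int) : Int :=
  if run = 2 then score + 1 else if run = 3 then score + 2 else score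

-- one iteration of Source B's loop body; state = (score, run, prev)
def pvStep (acc : Int × Int × Option Int) (x : Int) : Int × Int × Option Int :=
  if acc.2.1 ≠ 0 ∧ some x = acc.2.2 then (acc.1, acc.2.1 + 1, acc.2.2)
  else (pvFlush acc.1 acc.2.1, 1, some x)

def threePieces_alt (two_pieces_list : List Int) : Int :=
  let st := (PySem.List.sorted two_pieces_list (fun x => x) false).foldl pvStep (0, 0, none)
  pvFlush st.1 st.2.1

-- ===== PRECONDITION & SPEC =====
def Spec_threePieces (two_pieces_list : List Int) (out : Int) : Prop := out = threePieces_alt two_pieces_list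
instance (two_pieces_list : List Int) (out : Int) : Decidable (Spec_threePieces two_pieces_list out) := by unfold Spec_threePieces; infer_instance

-- ===== CLAIM (what is proved, stated in full; the proofs are below) =====
def Claim_equal_threePieces : Prop := ∀ (two_pieces_list : List Int), Dom_threePieces two_pieces_list → Spec_threePieces two_pieces_list (threePieces two_pieces_list)

-- ===== LEMMAS AND PROOFS =====

-- the per-multiplicity score both programs compute
def pvF (c : Nat) : Int := if c = 2 then 1 else if c = 3 then 2 else 0

-- the final flush applied to a scan state
def pvFin (st : Int × Int × Option Int) : Int := pvFlush st.1 st.2.1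

theorem pvFlush_zero (s : Int) : pvFlush s 0 = s := by simp [pvFlush]

theorem pvFlush_cast (s : Int) (k : Nat) : pvFlush s (k : Int) = s + pvF k := by
  unfold pvFlush pvF
  split_ifs <;> omega

-- A as a sum over the distinct elements
theorem threePieces_eq_sum (xs : List Int) :
    threePieces xs = ∑ p ∈ xs.toFinset, pvF (xs.count p) := by
  unfold threePieces
  have h1 : (PySem.List.dedup xs).foldl (fun three_pieces piece =>
      let count := PySem.List.count xs piece
      let three_pieces := if count = 2 then three_pieces + 1 else three_pieces
      if count = 3 then three_pieces + 2 else three_pieces) 0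
      = (PySem.List.dedup xs).foldl (fun a p => a + pvF (xs.count p)) 0 := by
    apply PySem.List.foldl_congr_mem
    intro acc p _
    simp only [PySem.List.count_eq, pvF]
    by_cases h2 : xs.count p = 2
    · simp [h2]
    · by_cases h3 : xs.count p = 3 <;> simp [h2, h3]
  rw [h1, PySem.List.foldl_add]
  have hfs : (PySem.List.dedup xs).toFinset = xs.toFinset := by
    ext x; simp [List.mem_toFinset]
  rw [← hfs, List.sum_toFinset _ (PySem.List.nodup_dedup xs)]
  simp

-- scanning a constant run from a live state just extends the run
theorem foldl_step_replicate (j : Nat) (s r : Int) (a : Int) (hr : 1 ≤ r) :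
    (List.replicate j a).foldl pvStep (s, r, some a) = (s, r + j, some a) := by
  induction j generalizing r with
  | zero => simp
  | succ m ih =>
    rw [List.replicate_succ, List.foldl_cons]
    have hstep : pvStep (s, r, some a) a = (s, r + 1, some a) := by
      simp [pvStep]; omega
    rw [hstep, ih (r + 1) (by omega)]
    push_cast; ring_nf

-- flushing a finished run commutes with the remaining scan when the next element differs
theorem foldl_step_flush (t : List Int) (s r : Int) (a : Int)
    (hhead : ∀ b t', t = b :: t' → b ≠ a) :
    t.foldl pvStep (s, r, some a) = if t = [] then (s, r, some a)
      else t.foldl pvStep (pvFlush s r, 0, none) := by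
  cases t with
  | nil => simp
  | cons b t' =>
    have hb := hhead b t' rfl
    simp only [List.foldl_cons, if_neg (List.cons_ne_nil b t')]
    have h1 : pvStep (s, r, some a) b = (pvFlush s r, 1, some b) := by
      simp [pvStep, hb]
    have h2 : pvStep (pvFlush s r, 0, none) b = (pvFlush s r, 1, some b) := by
      simp [pvStep, pvFlush_zero]
    rw [h1, h2]

-- the run-length scan of a sorted list computes the multiplicity sum
theorem scan_sorted (n : Nat) : ∀ (l : List Int), l.length ≤ n → l.Pairwise (· ≤ ·) → ∀ s : Int,
    pvFin (l.foldl pvStep (s, 0, none)) = s + ∑ p ∈ l.toFinset, pvF (l.count p) := by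
  induction n with
  | zero =>
    intro l hl _ s
    have hnil : l = [] := List.eq_nil_of_length_eq_zero (by omega)
    subst hnil; simp [pvFin, pvFlush_zero]
  | succ n ih =>
    intro l hl hsorted s
    cases l with
    | nil => simp [pvFin, pvFlush_zero]
    | cons a l' =>
      obtain ⟨k, hk⟩ : ∃ k, (List.takeWhile (fun b => b == a) (a :: l')).length = k := ⟨_, rfl⟩
      obtain ⟨t, ht⟩ : ∃ t, List.dropWhile (fun b => b == a) (a :: l') = t := ⟨_, rfl⟩
      have h_tw : List.takeWhile (fun b => b == a) (a :: l') = List.replicate k a := by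
        rw [List.eq_replicate_iff]
        refine ⟨hk, fun b hb => ?_⟩
        have := List.mem_takeWhile_imp hb
        simpa using this
      have h_split : a :: l' = List.replicate k a ++ t := by
        conv_lhs => rw [← List.takeWhile_append_dropWhile (p := fun b => b == a) (l := a :: l')]
        rw [h_tw, ht]
      have h_k : 1 ≤ k := by
        rw [← hk, List.takeWhile_cons, if_pos (by simp)]
        simp
      have h_headt : ∀ b t'', t = b :: t'' → b ≠ a := by
        intro b t'' hbt
        have := List.head?_dropWhile_not (fun b => b == a) (a :: l')
        rw [ht, hbt] at this
        simpa using this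
      have hpw : (List.replicate k a ++ t).Pairwise (· ≤ ·) := h_split ▸ hsorted
      obtain ⟨-, htp, hcross⟩ := List.pairwise_append.mp hpw
      have h_at : a ∉ t := by
        intro hat
        cases t with
        | nil => simp at hat
        | cons b t'' =>
          have hb : b ≠ a := h_headt b t'' rfl
          have hba : b ≤ a := by
            rcases List.mem_cons.mp hat with h | h
            · exact h.symm ▸ le_refl a
            · exact (List.pairwise_cons.mp htp).1 a h
          have hab : a ≤ b := hcross a (List.mem_replicate.mpr ⟨by omega, rfl⟩) b (List.mem_cons_self ..)
          exact hb (le_antisymm hba hab)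
      have h_count_a : (a :: l').count a = k := by
        rw [h_split, List.count_append, List.count_replicate_self,
          List.count_eq_zero.mpr h_at]
        simp
      have h_count_p : ∀ q ∈ t.toFinset, (a :: l').count q = t.count q := by
        intro q hq
        have hqa : q ≠ a := fun h => h_at (h ▸ List.mem_toFinset.mp hq)
        rw [h_split, List.count_append, List.count_replicate, if_neg (by simpa using Ne.symm hqa)]
        simp
      have h_len : t.length ≤ n := by
        have h1 := congrArg List.length h_split
        simp [List.length_append] at h1 hl
        omega
      have h_fs : (a :: l').toFinset = insert a t.toFinset := by
        rw [h_split, List.toFinset_append,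
          List.toFinset_replicate_of_ne_zero (by omega), Finset.singleton_union]
      have h_anotfs : a ∉ t.toFinset := fun h => h_at (List.mem_toFinset.mp h)
      have hsum : ∑ p ∈ (a :: l').toFinset, pvF ((a :: l').count p)
          = pvF k + ∑ p ∈ t.toFinset, pvF (t.count p) := by
        rw [h_fs, Finset.sum_insert h_anotfs, h_count_a]
        congr 1
        exact Finset.sum_congr rfl (fun q hq => by rw [h_count_p q hq])
      have hfold : (a :: l').foldl pvStep (s, 0, none) = t.foldl pvStep (s, (k : Int), some a) := by
        conv_lhs => rw [h_split]
        rw [List.foldl_append]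
        congr 1
        cases k with
        | zero => omega
        | succ m =>
          rw [List.replicate_succ, List.foldl_cons]
          have hstep : pvStep (s, 0, none) a = (s, 1, some a) := by
            simp [pvStep, pvFlush_zero]
          rw [hstep, foldl_step_replicate m s 1 a (le_refl 1)]
          push_cast; ring_nf
      rw [hfold, foldl_step_flush t s k a h_headt]
      by_cases htnil : t = []
      · rw [if_pos htnil]
        simp only [pvFin]
        rw [pvFlush_cast, hsum, htnil]
        simp
      · rw [if_neg htnil, ih t h_len htp (pvFlush s (k : Int)), pvFlush_cast, hsum]
        ring

theorem threePieces_alt_eq_sum (xs : List Int) :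
    threePieces_alt xs = ∑ p ∈ xs.toFinset, pvF (xs.count p) := by
  unfold threePieces_alt
  have hperm := PySem.List.sorted_perm xs (fun x => x) false
  have hsorted : (PySem.List.sorted xs (fun x => x) false).Pairwise (· ≤ ·) := by
    have := PySem.List.sorted_pairwise (xs := xs) (key := fun x => x)
    simpa using this
  have h := scan_sorted (PySem.List.sorted xs (fun x => x) false).length
    (PySem.List.sorted xs (fun x => x) false) (le_refl _) hsorted 0
  simp only [pvFin] at h
  rw [h, List.toFinset_eq_of_perm _ _ hperm, zero_add]
  exact Finset.sum_congr rfl (fun q _ => by rw [hperm.count_eq])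

-- ===== VERDICT (by name: the statement is the Claim_ definition above) =====
theorem threePieces_spec : Claim_equal_threePieces := by
  intro xs _
  unfold Spec_threePieces
  rw [threePieces_eq_sum, threePieces_alt_eq_sum]
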